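-- pv_equiv track=rewrite | github.com/Willianan/Algorithm_Book | Chapter4/4.8.py | MinDistance1
-- ===== SOURCE A (Python) =====
-- def maxs(a,b,c):
-- 	Maxs = b if a < b else a
-- 	Maxs = c if Maxs < c else Maxs
-- 	return Maxs
--
-- def MinDistance1(a,b,c):
-- 	aLen = len(a)
-- 	bLen = len(b)
-- 	cLen = len(c)
-- 	minDist = maxs(abs(a[0]-b[0]),abs(a[0]-c[0]),abs(b[0]-c[0]))
-- 	dist = 0
-- 	i = 0
-- 	while i < aLen:
-- 		j = 0
-- 		while j < bLen:
-- 			k = 0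
-- 			while k < cLen:
-- 				dist = maxs(abs(a[i]-b[j]),abs(a[i]-c[k]),abs(b[j]-c[k]))
-- 				# 找出最小距离
-- 				if minDist > dist:
-- 					minDist = dist
-- 				k += 1
-- 			j  += 1
-- 		i += 1
-- 	return minDist
-- ===== SOURCE B (Python) =====
-- def MinDistance1(a, b, c):
--     sa, sb, sc = sorted(a), sorted(b), sorted(c)
--     best = max(sa[0], sb[0], sc[0]) - min(sa[0], sb[0], sc[0])
--     i = j = k = 0
--     while i < len(sa) and j < len(sb) and k < len(sc):
--         x, y, z = sa[i], sb[j], sc[k]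
--         cur = max(x, y, z) - min(x, y, z)
--         if cur < best:
--             best = cur
--         if x <= y and x <= z:
--             i += 1
--         elif y <= z:
--             j += 1
--         else:
--             k += 1
--     return best
-- ===== Notes on version B (the rewrite author's own statement) =====
-- stated objective: faster
-- what changed: Replaces A's triple nested loop over all (i,j,k) with sorting the three lists and a single three-pointer sweep that always advances the pointer holding the smallest current value while tracking the minimum spread (max minus min of the current triple).
import Mathlib
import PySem

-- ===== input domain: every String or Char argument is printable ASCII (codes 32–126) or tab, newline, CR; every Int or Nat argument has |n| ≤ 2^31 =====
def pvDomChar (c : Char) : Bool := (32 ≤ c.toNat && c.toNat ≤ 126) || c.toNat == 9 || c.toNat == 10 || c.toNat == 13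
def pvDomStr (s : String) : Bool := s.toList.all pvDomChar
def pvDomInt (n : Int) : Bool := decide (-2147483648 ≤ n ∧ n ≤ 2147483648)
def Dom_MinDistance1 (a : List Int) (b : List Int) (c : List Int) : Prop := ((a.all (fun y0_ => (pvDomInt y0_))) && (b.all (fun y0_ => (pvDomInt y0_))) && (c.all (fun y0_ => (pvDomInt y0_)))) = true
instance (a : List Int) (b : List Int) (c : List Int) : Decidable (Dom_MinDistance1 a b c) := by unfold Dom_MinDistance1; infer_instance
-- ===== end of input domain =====

-- B sorts the three lists and runs a three-pointer sweep advancing the smallest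
-- current value (O(n log n + m log m + p log p)) instead of A's triple nested loop; objective: faster.

-- ===== PORT A =====
def maxs (a : Int) (b : Int) (c : Int) : Int :=
  let m1 : Int := if a < b then b else a
  if m1 < c then c else m1

def MinDistance1 (a : List Int) (b : List Int) (c : List Int) : Int :=
  -- a[0]/b[0]/c[0]: in range whenever the lists are nonempty (Pre_); getD 0 is exact there
  let minDist0 : Int := maxs |a.getD 0 0 - b.getD 0 0| |a.getD 0 0 - c.getD 0 0| |b.getD 0 0 - c.getD 0 0|
  a.foldl (fun md ai =>
    b.foldl (fun md bj =>
      c.foldl (fun md ck =>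
        let dist := maxs |ai - bj| |ai - ck| |bj - ck|
        if md > dist then dist else md) md) md) minDist0

-- ===== PORT B =====
def spread3 (x : Int) (y : Int) (z : Int) : Int :=
  max x (max y z) - min x (min y z)

-- the while loop of Source B: pointers into the sorted lists become structural recursion on suffixes
def greedy : Int → List Int → List Int → List Int → Int
  | best, x :: xs, y :: ys, z :: zs =>
      let cur := spread3 x y z
      let best' := if cur < best then cur else best
      if x ≤ y ∧ x ≤ z then greedy best' xs (y :: ys) (z :: zs)
      else if y ≤ z then greedy best' (x :: xs) ys (z :: zs)
      else greedy best' (x :: xs) (y :: ys) zs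
  | best, _, _, _ => best
  termination_by _ l1 l2 l3 => l1.length + l2.length + l3.length
  decreasing_by all_goals simp

def MinDistance1_alt (a : List Int) (b : List Int) (c : List Int) : Int :=
  let sa := PySem.List.sorted a (fun x => x) false
  let sb := PySem.List.sorted b (fun x => x) false
  let sc := PySem.List.sorted c (fun x => x) false
  let best0 := spread3 (sa.getD 0 0) (sb.getD 0 0) (sc.getD 0 0)
  greedy best0 sa sb sc

-- ===== PRECONDITION & SPEC =====
-- Pre_ excludes exactly the inputs with an empty list, on which A raises IndexError at a[0]/b[0]/c[0].
def Pre_MinDistance1 (a : List Int) (b : List Int) (c : List Int) : Prop :=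
  a ≠ [] ∧ b ≠ [] ∧ c ≠ []
instance (a : List Int) (b : List Int) (c : List Int) : Decidable (Pre_MinDistance1 a b c) := by
  unfold Pre_MinDistance1; infer_instance
def pvWitness_MinDistance1 : List Int × List Int × List Int := ([1, 5], [2], [9, 3])

def Spec_MinDistance1 (a : List Int) (b : List Int) (c : List Int) (out : Int) : Prop := out = MinDistance1_alt a b c
instance (a : List Int) (b : List Int) (c : List Int) (out : Int) : Decidable (Spec_MinDistance1 a b c out) := by unfold Spec_MinDistance1; infer_instance

-- ===== CLAIM (what is proved, stated in full; the proofs are below) =====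
def Claim_equal_MinDistance1 : Prop := ∀ (a : List Int) (b : List Int) (c : List Int), Dom_MinDistance1 a b c → Pre_MinDistance1 a b c → Spec_MinDistance1 a b c (MinDistance1 a b c)

-- ===== LEMMAS AND PROOFS =====

theorem maxs_abs (x y z : Int) : maxs |x - y| |x - z| |y - z| = spread3 x y z := by
  unfold maxs spread3
  simp only [abs, max_def, min_def]
  split_ifs <;> omega

-- generic facts about folds whose step never increases the accumulator
theorem fold_le_init {α : Type} (s : Int → α → Int) (hinit : ∀ m t, s m t ≤ m) :
    ∀ (l : List α) (m : Int), l.foldl s m ≤ m := by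
  intro l
  induction l with
  | nil => intro m; simp
  | cons t l ih => intro m; exact le_trans (ih (s m t)) (hinit m t)

theorem fold_le_mem {α : Type} (s : Int → α → Int) (f : α → Int)
    (hinit : ∀ m t, s m t ≤ m) (hhit : ∀ m t, s m t ≤ f t) :
    ∀ (l : List α) (m : Int) (t : α), t ∈ l → l.foldl s m ≤ f t := by
  intro l
  induction l with
  | nil => intro m t h; simp at h
  | cons u l ih =>
      intro m t h
      rcases List.mem_cons.mp h with h | h
      · subst h; exact le_trans (fold_le_init s hinit l (s m t)) (hhit m t)
      · exact ih (s m u) t h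

theorem fold_cases {α : Type} (s : Int → α → Int) (P : Int → α → Prop)
    (h : ∀ m t, s m t = m ∨ P (s m t) t) :
    ∀ (l : List α) (m : Int), l.foldl s m = m ∨ ∃ t ∈ l, P (l.foldl s m) t := by
  intro l
  induction l with
  | nil => intro m; left; rfl
  | cons u l ih =>
      intro m
      rw [List.foldl_cons]
      rcases ih (s m u) with h1 | ⟨t, ht, hp⟩
      · rw [h1]
        rcases h m u with h2 | h2
        · left; exact h2
        · right; exact ⟨u, by simp, h2⟩
      · right; exact ⟨t, by simp [ht], hp⟩

-- A with its if rewritten as min and maxs-over-abs rewritten as spread3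
theorem A_eq (a b c : List Int) :
    MinDistance1 a b c =
      a.foldl (fun md ai => b.foldl (fun md bj => c.foldl (fun md ck => min md (spread3 ai bj ck)) md) md)
        (spread3 (a.getD 0 0) (b.getD 0 0) (c.getD 0 0)) := by
  have hmin : ∀ (m d : Int), (if m > d then d else m) = min m d := by
    intro m d; rw [min_def]; split_ifs <;> omega
  unfold MinDistance1
  simp only [maxs_abs, hmin]

theorem A_le (a b c : List Int) (x y z : Int) (hx : x ∈ a) (hy : y ∈ b) (hz : z ∈ c) :
    MinDistance1 a b c ≤ spread3 x y z := by
  rw [A_eq]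
  have h1 : ∀ (ai bj : Int) (m : Int), c.foldl (fun md ck => min md (spread3 ai bj ck)) m ≤ m :=
    fun ai bj m => fold_le_init _ (fun m t => min_le_left _ _) c m
  have h2 : ∀ (ai : Int) (m : Int),
      b.foldl (fun md bj => c.foldl (fun md ck => min md (spread3 ai bj ck)) md) m ≤ m :=
    fun ai m => fold_le_init _ (fun m t => h1 ai t m) b m
  exact fold_le_mem _ (fun x => spread3 x y z)
    (fun m t => h2 t m)
    (fun m t => fold_le_mem _ (fun y' => spread3 t y' z)
        (fun m u => h1 t u m)
        (fun m u => fold_le_mem _ (fun z' => spread3 t u z')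
          (fun m v => min_le_left _ _)
          (fun m v => min_le_right _ _) c m z hz) b m y hy)
    a _ x hx

theorem A_cases (a b c : List Int) :
    MinDistance1 a b c = spread3 (a.getD 0 0) (b.getD 0 0) (c.getD 0 0) ∨
      ∃ x ∈ a, ∃ y ∈ b, ∃ z ∈ c, MinDistance1 a b c = spread3 x y z := by
  rw [A_eq]
  have hb : ∀ (m : Int) (t : Int),
      b.foldl (fun md bj => c.foldl (fun md ck => min md (spread3 t bj ck)) md) m = m ∨
        ∃ u ∈ b, ∃ v ∈ c,
          b.foldl (fun md bj => c.foldl (fun md ck => min md (spread3 t bj ck)) md) m = spread3 t u v := by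
    intro m t
    rcases fold_cases _ (fun r u => ∃ v ∈ c, r = spread3 t u v)
        (fun m u => by
          rcases fold_cases _ (fun r v => r = spread3 t u v) (fun m v => min_choice _ _) c m with
            h | ⟨v, hv, he⟩
          · left; exact h
          · right; exact ⟨v, hv, he⟩) b m with h | ⟨u, hu, v, hv, he⟩
    · left; exact h
    · right; exact ⟨u, hu, v, hv, he⟩
  rcases fold_cases _ (fun r t => ∃ u ∈ b, ∃ v ∈ c, r = spread3 t u v) hb a _ with
    h | ⟨t, ht, u, hu, v, hv, he⟩
  · left; exact h
  · right; exact ⟨t, ht, u, hu, v, hv, he⟩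

-- spread3 comparison lemmas: the named element is the minimum of its triple,
-- the other two only grow
theorem spread3_key1 (x0 y0 z0 y z : Int) (h1 : x0 ≤ y0) (h2 : x0 ≤ z0)
    (hy : y0 ≤ y) (hz : z0 ≤ z) : spread3 x0 y0 z0 ≤ spread3 x0 y z := by
  simp only [spread3, max_def, min_def]; split_ifs <;> omega

theorem spread3_key2 (x0 y0 z0 x z : Int) (h1 : y0 ≤ x0) (h2 : y0 ≤ z0)
    (hx : x0 ≤ x) (hz : z0 ≤ z) : spread3 x0 y0 z0 ≤ spread3 x y0 z := by
  simp only [spread3, max_def, min_def]; split_ifs <;> omega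

theorem spread3_key3 (x0 y0 z0 x y : Int) (h1 : z0 ≤ x0) (h2 : z0 ≤ y0)
    (hx : x0 ≤ x) (hy : y0 ≤ y) : spread3 x0 y0 z0 ≤ spread3 x y z0 := by
  simp only [spread3, max_def, min_def]; split_ifs <;> omega

theorem greedy_le_best (best : Int) (l1 l2 l3 : List Int) : greedy best l1 l2 l3 ≤ best := by
  fun_induction greedy best l1 l2 l3 with
  | case1 best x xs y ys z zs cur best' h ih =>
      refine le_trans ih ?_
      simp only [best']; split_ifs <;> omega
  | case2 best x xs y ys z zs cur best' h h' ih =>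
      refine le_trans ih ?_
      simp only [best']; split_ifs <;> omega
  | case3 best x xs y ys z zs cur best' h h' ih =>
      refine le_trans ih ?_
      simp only [best']; split_ifs <;> omega
  | case4 best l1 l2 l3 h => exact le_refl _

theorem greedy_cases (best : Int) (l1 l2 l3 : List Int) :
    greedy best l1 l2 l3 = best ∨
      ∃ x ∈ l1, ∃ y ∈ l2, ∃ z ∈ l3, greedy best l1 l2 l3 = spread3 x y z := by
  fun_induction greedy best l1 l2 l3 with
  | case1 best x xs y ys z zs cur best' h ih =>
      rcases ih with h1 | ⟨x', hx', y', hy', z', hz', he⟩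
      · rw [h1]
        simp only [best', cur]
        split_ifs with hd
        · right; exact ⟨x, by simp, y, by simp, z, by simp, rfl⟩
        · left; rfl
      · right; exact ⟨x', by simp [hx'], y', hy', z', hz', he⟩
  | case2 best x xs y ys z zs cur best' h h' ih =>
      rcases ih with h1 | ⟨x', hx', y', hy', z', hz', he⟩
      · rw [h1]
        simp only [best', cur]
        split_ifs with hd
        · right; exact ⟨x, by simp, y, by simp, z, by simp, rfl⟩
        · left; rfl
      · right; exact ⟨x', hx', y', by simp [hy'], z', hz', he⟩
  | case3 best x xs y ys z zs cur best' h h' ih =>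
      rcases ih with h1 | ⟨x', hx', y', hy', z', hz', he⟩
      · rw [h1]
        simp only [best', cur]
        split_ifs with hd
        · right; exact ⟨x, by simp, y, by simp, z, by simp, rfl⟩
        · left; rfl
      · right; exact ⟨x', hx', y', hy', z', by simp [hz'], he⟩
  | case4 best l1 l2 l3 h => left; rfl

theorem head_min_of_pairwise {h0 : Int} {t : List Int}
    (hp : (h0 :: t).Pairwise (· ≤ ·)) : ∀ y ∈ h0 :: t, h0 ≤ y := by
  intro y hy
  rcases List.mem_cons.mp hy with h | h
  · omega
  · exact (List.pairwise_cons.mp hp).1 y h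

theorem greedy_le (best : Int) (l1 l2 l3 : List Int) :
    l1.Pairwise (· ≤ ·) → l2.Pairwise (· ≤ ·) → l3.Pairwise (· ≤ ·) →
      ∀ x y z : Int, x ∈ l1 → y ∈ l2 → z ∈ l3 → greedy best l1 l2 l3 ≤ spread3 x y z := by
  fun_induction greedy best l1 l2 l3 with
  | case1 best x0 xs y0 ys z0 zs cur best' h ih =>
      intro h1 h2 h3 x y z hx hy hz
      rcases List.mem_cons.mp hx with hx0 | hx0
      · subst hx0
        have hbest' : best' ≤ cur := by simp only [best']; split_ifs <;> omega
        refine le_trans (greedy_le_best _ _ _ _) (le_trans hbest' ?_)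
        exact spread3_key1 x y0 z0 y z h.1 h.2 (head_min_of_pairwise h2 y hy)
          (head_min_of_pairwise h3 z hz)
      · exact ih (List.Pairwise.of_cons h1) h2 h3 x y z hx0 hy hz
  | case2 best x0 xs y0 ys z0 zs cur best' h h' ih =>
      intro h1 h2 h3 x y z hx hy hz
      have hmin : y0 ≤ x0 ∧ y0 ≤ z0 := by
        rcases Decidable.not_and_iff_not_or_not.mp h with hn | hn <;> omega
      rcases List.mem_cons.mp hy with hy0 | hy0
      · subst hy0
        have hbest' : best' ≤ cur := by simp only [best']; split_ifs <;> omega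
        refine le_trans (greedy_le_best _ _ _ _) (le_trans hbest' ?_)
        exact spread3_key2 x0 y z0 x z hmin.1 hmin.2 (head_min_of_pairwise h1 x hx)
          (head_min_of_pairwise h3 z hz)
      · exact ih h1 (List.Pairwise.of_cons h2) h3 x y z hx hy0 hz
  | case3 best x0 xs y0 ys z0 zs cur best' h h' ih =>
      intro h1 h2 h3 x y z hx hy hz
      have hmin : z0 ≤ x0 ∧ z0 ≤ y0 := by
        rcases Decidable.not_and_iff_not_or_not.mp h with hn | hn <;> omega
      rcases List.mem_cons.mp hz with hz0 | hz0
      · subst hz0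
        have hbest' : best' ≤ cur := by simp only [best']; split_ifs <;> omega
        refine le_trans (greedy_le_best _ _ _ _) (le_trans hbest' ?_)
        exact spread3_key3 x0 y0 z x y hmin.1 hmin.2 (head_min_of_pairwise h1 x hx)
          (head_min_of_pairwise h2 y hy)
      · exact ih h1 h2 (List.Pairwise.of_cons h3) x y z hx hy hz0
  | case4 best l1 l2 l3 h =>
      intro h1 h2 h3 x y z hx hy hz
      -- one of the three lists is empty, contradicting a membership
      rcases l1 with _ | ⟨a1, t1⟩
      · simp at hx
      rcases l2 with _ | ⟨a2, t2⟩
      · simp at hy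
      rcases l3 with _ | ⟨a3, t3⟩
      · simp at hz
      exact (h a1 t1 a2 t2 a3 t3 rfl rfl rfl).elim

theorem getD_mem {l : List Int} (h : l ≠ []) : l.getD 0 0 ∈ l := by
  cases l with
  | nil => exact absurd rfl h
  | cons a t => simp [List.getD]

theorem sorted_ne_nil {l : List Int} (h : l ≠ []) :
    PySem.List.sorted l (fun x => x) false ≠ [] := by
  intro hc
  simp only [PySem.List.sorted_eq_nil_iff] at hc
  exact h hc

theorem sorted_pairwise_le (l : List Int) :
    (PySem.List.sorted l (fun x => x) false).Pairwise (· ≤ ·) :=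
  PySem.List.sorted_pairwise l (fun x => x)

theorem mem_sorted_iff {x : Int} {l : List Int} :
    x ∈ PySem.List.sorted l (fun x => x) false ↔ x ∈ l :=
  PySem.List.mem_sorted l (fun x => x) false x

-- ===== VERDICT (by name: the statement is the Claim_ definition above) =====
theorem MinDistance1_spec : Claim_equal_MinDistance1 := by
  intro a b c _hdom hpre
  obtain ⟨ha, hb, hc⟩ := hpre
  show MinDistance1 a b c = MinDistance1_alt a b c
  unfold MinDistance1_alt
  have hsa := sorted_ne_nil ha
  have hsb := sorted_ne_nil hb
  have hsc := sorted_ne_nil hc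
  apply le_antisymm
  · -- A ≤ B: B's result is the spread of some real triple
    rcases greedy_cases (spread3 ((PySem.List.sorted a (fun x => x) false).getD 0 0)
        ((PySem.List.sorted b (fun x => x) false).getD 0 0)
        ((PySem.List.sorted c (fun x => x) false).getD 0 0))
        (PySem.List.sorted a (fun x => x) false) (PySem.List.sorted b (fun x => x) false)
        (PySem.List.sorted c (fun x => x) false) with heq | ⟨x, hx, y, hy, z, hz, heq⟩
    · rw [heq]
      exact A_le a b c _ _ _ (mem_sorted_iff.mp (getD_mem hsa))
        (mem_sorted_iff.mp (getD_mem hsb)) (mem_sorted_iff.mp (getD_mem hsc))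
    · rw [heq]
      exact A_le a b c x y z (mem_sorted_iff.mp hx) (mem_sorted_iff.mp hy)
        (mem_sorted_iff.mp hz)
  · -- B ≤ A: A's result is the spread of some real triple
    rcases A_cases a b c with heq | ⟨x, hx, y, hy, z, hz, heq⟩
    · rw [heq]
      exact greedy_le _ _ _ _ (sorted_pairwise_le a) (sorted_pairwise_le b) (sorted_pairwise_le c)
        _ _ _ (mem_sorted_iff.mpr (getD_mem ha)) (mem_sorted_iff.mpr (getD_mem hb))
        (mem_sorted_iff.mpr (getD_mem hc))
    · rw [heq]
      exact greedy_le _ _ _ _ (sorted_pairwise_le a) (sorted_pairwise_le b) (sorted_pairwise_le c)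
        x y z (mem_sorted_iff.mpr hx) (mem_sorted_iff.mpr hy) (mem_sorted_iff.mpr hz)
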